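-- pv_equiv track=rewrite | github.com/weilunn97/Google-OA-2020 | water_flowers.py | water_flowers
-- ===== SOURCE A (Python) =====
-- from typing import List
--
-- def water_flowers(items: List[int], c1: int, c2: int) -> int:
--     """
--     Time  : O(N)
--     Space : O(1)
--     """
--     # EDGE CASE
--     if len(items) == 0:
--         return 0
--     if len(items) == 1:
--         return 1
--
--     # SETUP DOUBLE POINTERS
--     front, back = 0, len(items) - 1
--     fVol, bVol = c1, c2
--     refills = 2  # FOR INITIAL FILL
--
--     # LOOP TILL CROSS
--     while front < back:
--         # WATER FRONT
--         refills += int(fVol < items[front])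
--         fVol = c1 if fVol < items[front] else fVol
--         fVol -= items[front]
--
--         # WATER BACK
--         refills += int(bVol < items[back])
--         bVol = c2 if bVol < items[back] else bVol
--         bVol -= items[back]
--
--         front += 1
--         back -= 1
--
--     # FINAL WATERING
--     if front == back:
--         refills += int(fVol + bVol < items[front])
--
--     return refills
-- ===== SOURCE B (Python) =====
-- def _can(c, xs):
--     """Refills and leftover volume for one can over xs, via greedy chunking:
--     cut xs into maximal consecutive chunks of total need <= c (the opening
--     chunk may be empty; every later chunk takes at least one flower).  Each
--     cut is one refill, and the leftover volume is c minus the last chunk's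
--     total."""
--     n = len(xs)
--     i, s = 0, 0
--     while i < n and s + xs[i] <= c:   # opening chunk covered by the initial fill
--         s += xs[i]
--         i += 1
--     refills = 0
--     while i < n:                      # each further chunk opens with a refill
--         refills += 1
--         s = xs[i]
--         i += 1
--         while i < n and s + xs[i] <= c:
--             s += xs[i]
--             i += 1
--     return refills, c - s
--
--
-- def water_flowers(items, c1, c2):
--     n = len(items)
--     if n == 0:
--         return 0
--     if n == 1:
--         return 1
--     k = n // 2
--     rf, fvol = _can(c1, items[:k])
--     rb, bvol = _can(c2, items[-k:][::-1])
--     total = 2 + rf + rb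
--     if n % 2:
--         total += fvol + bvol < items[k]
--     return total
-- ===== Notes on version B (the rewrite author's own statement) =====
-- stated objective: alternative
-- what changed: Instead of simulating a decreasing can volume per flower, B greedily cuts each gardener's half into maximal consecutive chunks whose total need fits one can-load (prefix-sum chunking with nested loops); the refill count is the number of cuts and the leftover volume is capacity minus the last chunk's total, with a separate shared-middle check for odd length.
import Mathlib
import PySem

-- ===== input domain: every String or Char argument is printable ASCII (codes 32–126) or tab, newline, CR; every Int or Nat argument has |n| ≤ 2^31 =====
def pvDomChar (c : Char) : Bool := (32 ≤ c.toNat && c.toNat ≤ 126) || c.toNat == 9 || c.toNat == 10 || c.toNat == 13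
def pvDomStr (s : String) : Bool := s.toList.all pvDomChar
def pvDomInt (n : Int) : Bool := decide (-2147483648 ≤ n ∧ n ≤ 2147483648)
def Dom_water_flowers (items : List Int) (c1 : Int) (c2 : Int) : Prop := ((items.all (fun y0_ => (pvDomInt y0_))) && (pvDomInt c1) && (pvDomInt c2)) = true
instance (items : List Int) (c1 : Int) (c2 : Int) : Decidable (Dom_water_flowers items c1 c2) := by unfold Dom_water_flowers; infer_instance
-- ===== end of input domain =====

-- B replaces A's volume-simulating two-pointer loop by greedy chunking of each half into
-- maximal capacity-chunks (refills = number of cuts); objective: alternative decomposition.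

-- ===== PORT A =====
-- A's while-loop (front/back pointers, both cans interleaved per iteration).
-- items[front]/items[back] are ported as getD: A only evaluates them at in-range indices.
def water_flowers_loop (items : List Int) (c1 : Int) (c2 : Int)
    (front back fVol bVol refills : Int) : Int :=
  if h : front < back then
    let xf := items.getD front.toNat 0
    let refills1 := refills + (if fVol < xf then 1 else 0)
    let fVol1 := (if fVol < xf then c1 else fVol) - xf
    let xb := items.getD back.toNat 0
    let refills2 := refills1 + (if bVol < xb then 1 else 0)
    let bVol1 := (if bVol < xb then c2 else bVol) - xb
    water_flowers_loop items c1 c2 (front + 1) (back - 1) fVol1 bVol1 refills2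
  else if front = back then
    refills + (if fVol + bVol < items.getD front.toNat 0 then 1 else 0)
  else refills
termination_by (back - front).toNat
decreasing_by omega

def water_flowers (items : List Int) (c1 : Int) (c2 : Int) : Int :=
  if items.length = 0 then 0
  else if items.length = 1 then 1
  else water_flowers_loop items c1 c2 0 ((items.length : Int) - 1) c1 c2 2

-- ===== PORT B =====
-- Source B's inner 'while i < n and s + xs[i] <= c' loop: extend the current chunk (running
-- sum s) as far as it fits capacity c; returns the chunk's total and the unconsumed rest.
def blockSplit (c : Int) (s : Int) : List Int → Int × List Int
  | [] => (s, [])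
  | x :: xs => if s + x ≤ c then blockSplit c (s + x) xs else (s, x :: xs)

theorem blockSplit_rest_length (c s : Int) (xs : List Int) :
    (blockSplit c s xs).2.length ≤ xs.length := by
  induction xs generalizing s with
  | nil => simp [blockSplit]
  | cons x t ih =>
      simp only [blockSplit]
      split_ifs
      · exact le_trans (ih (s + x)) (by simp)
      · simp

-- Source B's 'while i < n: refills += 1; …' loop: each later chunk opens with a refill and
-- at least one flower; returns (number of refills, last chunk's total), s being the
-- total of the chunk already closed.
def chunkRest (c : Int) : List Int → Int → Int × Int
  | [], s => (0, s)
  | x :: xs, _ =>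
      let p := blockSplit c x xs
      let q := chunkRest c p.2 p.1
      (q.1 + 1, q.2)
termination_by xs => xs.length
decreasing_by simpa using Nat.lt_succ_of_le (blockSplit_rest_length c x xs)

-- Source B's _can: opening chunk from sum 0, then the remaining chunks; leftover = c - last sum
def canFn (c : Int) (xs : List Int) : Int × Int :=
  let p := blockSplit c 0 xs
  let q := chunkRest c p.2 p.1
  (q.1, c - q.2)

def water_flowers_alt (items : List Int) (c1 : Int) (c2 : Int) : Int :=
  let n := items.length
  if n = 0 then 0
  else if n = 1 then 1
  else
    let k := n / 2
    let f := canFn c1 (items.take k)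
    let b := canFn c2 ((items.drop (n - k)).reverse)
    let total := 2 + f.1 + b.1
    if n % 2 = 1 then total + (if f.2 + b.2 < items.getD k 0 then 1 else 0)
    else total

-- ===== PRECONDITION & SPEC =====
def Spec_water_flowers (items : List Int) (c1 : Int) (c2 : Int) (out : Int) : Prop := out = water_flowers_alt items c1 c2
instance (items : List Int) (c1 : Int) (c2 : Int) (out : Int) : Decidable (Spec_water_flowers items c1 c2 out) := by unfold Spec_water_flowers; infer_instance

-- ===== CLAIM (what is proved, stated in full; the proofs are below) =====
def Claim_equal_water_flowers : Prop := ∀ (items : List Int) (c1 : Int) (c2 : Int), Dom_water_flowers items c1 c2 → Spec_water_flowers items c1 c2 (water_flowers items c1 c2)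

-- ===== LEMMAS AND PROOFS =====

-- proof-side abstraction of one watering step of a single can with capacity c
def altPass (c : Int) : (Int × Int) → Int → (Int × Int)
  | (vol, r), x => if vol < x then (c - x, r + 1) else (vol - x, r)

-- the refill counter of a single-can fold is purely additive, and the volume ignores it
theorem altPass_foldl_add (c : Int) (l : List Int) (v r : Int) :
    l.foldl (altPass c) (v, r) =
      ((l.foldl (altPass c) (v, 0)).1, r + (l.foldl (altPass c) (v, 0)).2) := by
  induction l generalizing v r with
  | nil => simp
  | cons x xs ih =>
      simp only [List.foldl_cons, altPass]
      split_ifs with h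
      · rw [ih (c - x) (r + 1), ih (c - x) (0 + 1)]
        exact Prod.ext rfl (by omega)
      · exact ih (v - x) r

-- one interleaved step folded into the per-can pass: volume and count separated
theorem altPass_foldl_step (c : Int) (v x : Int) (l : List Int) :
    l.foldl (altPass c) (altPass c (v, 0) x) =
      ((l.foldl (altPass c) ((if v < x then c - x else v - x), 0)).1,
       (if v < x then (1 : Int) else 0)
         + (l.foldl (altPass c) ((if v < x then c - x else v - x), 0)).2) := by
  simp only [altPass]
  split_ifs with h
  · rw [altPass_foldl_add c l (c - x) (0 + 1)]
    exact Prod.ext rfl (by omega)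
  · rw [altPass_foldl_add c l (v - x) 0]
    exact Prod.ext rfl (by omega)

-- main invariant for A: the interleaved loop equals the two independent folds
theorem loop_eq (items : List Int) (c1 c2 : Int) :
    ∀ (m f b : ℕ), b < items.length →
      (b + 1 = f + 2 * m ∨ b + 1 = f + 2 * m + 1) →
      ∀ (fVol bVol refills : Int),
        water_flowers_loop items c1 c2 (f : Int) (b : Int) fVol bVol refills =
          refills
            + (((items.drop f).take m).foldl (altPass c1) (fVol, 0)).2
            + ((((items.drop (b + 1 - m)).take m).reverse).foldl (altPass c2) (bVol, 0)).2
            + (if b + 1 = f + 2 * m + 1 then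
                 (if (((items.drop f).take m).foldl (altPass c1) (fVol, 0)).1
                      + ((((items.drop (b + 1 - m)).take m).reverse).foldl (altPass c2) (bVol, 0)).1
                      < items.getD (f + m) 0 then 1 else 0)
               else 0) := by
  intro m
  induction m with
  | zero =>
      intro f b hb hm fVol bVol refills
      rw [water_flowers_loop]
      rcases hm with hm | hm
      · rw [dif_neg (by omega : ¬ ((f : Int) < (b : Int))),
            if_neg (by omega : ¬ ((f : Int) = (b : Int)))]
        rw [if_neg (by omega : ¬ (b + 1 = f + 2 * 0 + 1))]
        simp
      · have hf : f = b := by omega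
        subst hf
        rw [dif_neg (by omega : ¬ ((f : Int) < (f : Int))),
            if_pos rfl, if_pos (by omega : f + 1 = f + 2 * 0 + 1)]
        simp [List.take_zero]
  | succ m ih =>
      intro f b hb hm fVol bVol refills
      have hfb : (f : Int) < (b : Int) := by omega
      have hfl : f < items.length := by omega
      have hmb : m + 1 ≤ b := by omega
      rw [water_flowers_loop, dif_pos hfb]
      rw [show ((f : Int)).toNat = f by omega, show ((b : Int)).toNat = b by omega,
          show (f : Int) + 1 = ((f + 1 : ℕ) : Int) by push_cast; ring,
          show (b : Int) - 1 = ((b - 1 : ℕ) : Int) by omega]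
      rw [ih (f + 1) (b - 1) (by omega) (by omega)]
      have hA : (items.drop f).take (m + 1)
          = items.getD f 0 :: (items.drop (f + 1)).take m := by
        rw [List.drop_eq_getElem_cons hfl, List.take_succ_cons,
            List.getD_eq_getElem items 0 hfl]
      have hgb : (items.drop (b - m))[m]? = some (items.getD b 0) := by
        rw [List.getElem?_drop, show b - m + m = b by omega,
            List.getElem?_eq_getElem hb, List.getD_eq_getElem items 0 hb]
      have hB : ((items.drop (b + 1 - (m + 1))).take (m + 1)).reverse
          = items.getD b 0 :: ((items.drop (b - 1 + 1 - m)).take m).reverse := by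
        rw [show b + 1 - (m + 1) = b - m by omega, show b - 1 + 1 - m = b - m by omega,
            List.take_add_one, hgb]
        simp
      rw [hA, hB]
      simp only [List.foldl_cons, altPass_foldl_step,
        show (b - 1 + 1 = f + 1 + 2 * m + 1) = (b + 1 = f + 2 * (m + 1) + 1) from
          propext (by omega),
        show f + 1 + m = f + (m + 1) by omega]
      split_ifs <;> ring

-- bridge for B: the volume-simulating fold equals the chunk decomposition
theorem foldl_eq_chunk (c : Int) (xs : List Int) :
    ∀ (s r : Int),
      xs.foldl (altPass c) (c - s, r) =
        (c - (chunkRest c (blockSplit c s xs).2 (blockSplit c s xs).1).2,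
         r + (chunkRest c (blockSplit c s xs).2 (blockSplit c s xs).1).1) := by
  induction xs with
  | nil => intro s r; simp [blockSplit, chunkRest]
  | cons x t ih =>
      intro s r
      by_cases h : s + x ≤ c
      · have hx : ¬ (c - s < x) := by omega
        simp only [List.foldl_cons, altPass, if_neg hx, blockSplit, if_pos h]
        rw [show c - s - x = c - (s + x) by ring]
        exact ih (s + x) r
      · have hx : c - s < x := by omega
        simp only [List.foldl_cons, altPass, if_pos hx, blockSplit, if_neg h]
        -- fold over t from volume c - x: the IH with s := x, count shifted by the refill
        rw [ih x (r + 1)]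
        simp only [chunkRest]
        exact Prod.ext rfl (by ring)

theorem canFn_spec (c : Int) (xs : List Int) :
    xs.foldl (altPass c) (c, 0) = ((canFn c xs).2, (canFn c xs).1) := by
  have := foldl_eq_chunk c xs 0 0
  simpa [canFn] using this

-- ===== VERDICT (by name: the statement is the Claim_ definition above) =====
theorem water_flowers_spec : Claim_equal_water_flowers := by
  intro items c1 c2 _
  unfold Spec_water_flowers water_flowers water_flowers_alt
  by_cases h0 : items.length = 0
  · simp [h0]
  · by_cases h1 : items.length = 1
    · simp [h1]
    · have h2 : 2 ≤ items.length := by omega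
      rw [if_neg h0, if_neg h1]
      simp only [if_neg h0, if_neg h1]
      have hl := loop_eq items c1 c2 (items.length / 2) 0 (items.length - 1)
        (by omega) (by omega) c1 c2 2
      simp only [Nat.cast_zero] at hl
      rw [show ((items.length : Int) - 1) = ((items.length - 1 : ℕ) : Int) by omega, hl]
      have hd0 : items.drop 0 = items := List.drop_zero
      have hseg : (items.drop (items.length - 1 + 1 - items.length / 2)).take (items.length / 2)
          = items.drop (items.length - items.length / 2) := by
        rw [show items.length - 1 + 1 - items.length / 2 = items.length - items.length / 2 by omega]
        exact List.take_of_length_le (by simp; omega)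
      have hpar : (items.length - 1 + 1 = 0 + 2 * (items.length / 2) + 1)
          ↔ (items.length % 2 = 1) := by omega
      simp only [hd0, hseg, hpar, show 0 + items.length / 2 = items.length / 2 by omega,
        canFn_spec]
      split_ifs <;> ring
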